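-- pv_equiv track=rewrite | github.com/Fat83dotcom/Algoritmos_4_semestre | codigosEmPython/arvoresPython.py | tupleDateFactory
-- ===== SOURCE A (Python) =====
-- def tupleDateFactory(startYear: int, endYear: int) -> list:
--     tupleData = []
--     for year in range(startYear, endYear + 1):
--         for month in range(1, 13):  # Mês varia de 1 a 12
--             if month == 4 or month == 6 or month == 9 or month == 11:
--                 daysOfMonths = 30
--             elif month == 2:
--                 if year % 4 == 0 and (year % 100 != 0 or year % 400 == 0):
--                     daysOfMonths = 29
--                 else:
--                     daysOfMonths = 28
--             else:
--                 daysOfMonths = 31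
--             for day in range(1, daysOfMonths + 1):
--                 tupleData.append((year, month, day))
--     return tupleData
-- ===== SOURCE B (Python) =====
-- _MDAYS = (31, 28, 31, 30, 31, 30, 31, 31, 30, 31, 30, 31)
-- _COMMON = [(m, d) for m in range(1, 13) for d in range(1, _MDAYS[m - 1] + 1)]
-- _LEAP = _COMMON[:59] + [(2, 29)] + _COMMON[59:]
--
--
-- def tupleDateFactory(startYear: int, endYear: int) -> list:
--     out = []
--     for y in range(startYear, endYear + 1):
--         template = _LEAP if (y % 4 == 0 and (y % 100 != 0 or y % 400 == 0)) else _COMMON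
--         out += [(y, m, d) for (m, d) in template]
--     return out
-- ===== Notes on version B (the rewrite author's own statement) =====
-- stated objective: simpler
-- what changed: Replaces the per-day triple nested loop with hand-computed month lengths by two precomputed year templates (common and leap, built once at module load) that a single loop over the years maps into (year, month, day) triples.
import Mathlib
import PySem

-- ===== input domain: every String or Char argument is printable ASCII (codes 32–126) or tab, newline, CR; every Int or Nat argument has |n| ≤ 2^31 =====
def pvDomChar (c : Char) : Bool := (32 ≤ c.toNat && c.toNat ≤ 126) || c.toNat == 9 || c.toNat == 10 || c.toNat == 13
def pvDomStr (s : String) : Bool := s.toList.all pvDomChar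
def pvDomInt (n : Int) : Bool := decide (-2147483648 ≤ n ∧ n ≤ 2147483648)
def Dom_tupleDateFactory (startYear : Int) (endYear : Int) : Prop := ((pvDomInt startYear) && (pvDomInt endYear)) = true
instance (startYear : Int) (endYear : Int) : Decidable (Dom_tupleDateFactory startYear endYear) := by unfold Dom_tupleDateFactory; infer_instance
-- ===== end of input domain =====

-- B replaces the per-day triple loop (with hand-computed month lengths) by two precomputed
-- year templates (common/leap) mapped over the year range; objective: simpler.

-- ===== PORT A =====
def tupleDateFactory (startYear : Int) (endYear : Int) : List (Int × Int × Int) :=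
  (PySem.List.pyRange startYear (endYear + 1) 1).foldl (fun tupleData year =>
    (PySem.List.pyRange 1 13 1).foldl (fun acc month =>
      let daysOfMonths : Int :=
        if month == 4 || month == 6 || month == 9 || month == 11 then 30
        else if month == 2 then
          (if PySem.Int.mod year 4 == 0 &&
              (PySem.Int.mod year 100 != 0 || PySem.Int.mod year 400 == 0) then 29 else 28)
        else 31
      (PySem.List.pyRange 1 (daysOfMonths + 1) 1).foldl
        (fun acc2 day => acc2 ++ [(year, month, day)]) acc) tupleData) []

-- ===== PORT B =====
def pvMDays : List Int := [31, 28, 31, 30, 31, 30, 31, 31, 30, 31, 30, 31]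

def pvCommon : List (Int × Int) :=
  (PySem.List.pyRange 1 13 1).flatMap (fun m =>
    (PySem.List.pyRange 1 (PySem.List.pyGetD pvMDays (m - 1) 0 + 1) 1).map (fun d => (m, d)))

def pvLeap : List (Int × Int) :=
  PySem.List.slice pvCommon none (some 59) ++ [((2 : Int), (29 : Int))] ++
    PySem.List.slice pvCommon (some 59) none

def tupleDateFactory_alt (startYear : Int) (endYear : Int) : List (Int × Int × Int) :=
  (PySem.List.pyRange startYear (endYear + 1) 1).foldl (fun out y =>
    out ++ (if PySem.Int.mod y 4 == 0 &&
               (PySem.Int.mod y 100 != 0 || PySem.Int.mod y 400 == 0) then pvLeap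
            else pvCommon).map (fun p => (y, p.1, p.2))) []

-- ===== PRECONDITION & SPEC =====
def Spec_tupleDateFactory (startYear : Int) (endYear : Int) (out : List (Int × Int × Int)) : Prop := out = tupleDateFactory_alt startYear endYear
instance (startYear : Int) (endYear : Int) (out : List (Int × Int × Int)) : Decidable (Spec_tupleDateFactory startYear endYear out) := by unfold Spec_tupleDateFactory; infer_instance

-- ===== CLAIM (what is proved, stated in full; the proofs are below) =====
def Claim_equal_tupleDateFactory : Prop := ∀ (startYear : Int) (endYear : Int), Dom_tupleDateFactory startYear endYear → Spec_tupleDateFactory startYear endYear (tupleDateFactory startYear endYear)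

-- ===== LEMMAS AND PROOFS =====

-- B's templates, written as the month/day pair lists A's hand-computed month lengths generate.
set_option maxRecDepth 40000 in
theorem pv_common_eq :
    pvCommon = (PySem.List.pyRange 1 13 1).flatMap (fun m =>
      (PySem.List.pyRange 1 ((if m == 4 || m == 6 || m == 9 || m == 11 then (30 : Int)
                              else if m == 2 then 28 else 31) + 1) 1).map (fun d => (m, d))) := by
  decide

set_option maxRecDepth 40000 in
theorem pv_leap_eq :
    pvLeap = (PySem.List.pyRange 1 13 1).flatMap (fun m =>
      (PySem.List.pyRange 1 ((if m == 4 || m == 6 || m == 9 || m == 11 then (30 : Int)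
                              else if m == 2 then 29 else 31) + 1) 1).map (fun d => (m, d))) := by
  decide

-- A's flattened month/day loops for one year y equal B's template for y, lifted with y.
theorem pv_year (y : Int) :
    List.flatMap (fun m =>
      List.map (fun d => (y, m, d))
        (PySem.List.pyRange 1
          ((if m == 4 || m == 6 || m == 9 || m == 11 then (30 : Int)
            else if m == 2 then
              (if PySem.Int.mod y 4 == 0 &&
                  (PySem.Int.mod y 100 != 0 || PySem.Int.mod y 400 == 0) then 29 else 28)
            else 31) + 1) 1)) (PySem.List.pyRange 1 13 1)
    = List.map (fun p => (y, p.1, p.2))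
        (if PySem.Int.mod y 4 == 0 &&
            (PySem.Int.mod y 100 != 0 || PySem.Int.mod y 400 == 0) then pvLeap else pvCommon) := by
  by_cases h : (PySem.Int.mod y 4 == 0 &&
      (PySem.Int.mod y 100 != 0 || PySem.Int.mod y 400 == 0)) = true
  · simp only [h, if_true, pv_leap_eq, List.map_flatMap, List.map_map]
    rfl
  · simp only [Bool.not_eq_true] at h
    simp only [h, Bool.false_eq_true, if_false, pv_common_eq, List.map_flatMap, List.map_map]
    rfl

theorem tupleDateFactory_spec : Claim_equal_tupleDateFactory := by
  intro startYear endYear _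
  unfold Spec_tupleDateFactory tupleDateFactory tupleDateFactory_alt
  simp only [PySem.List.foldl_append_singleton_eq_map, PySem.List.foldl_append_eq_flatMap,
    List.nil_append, pv_year]
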